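-- pv_equiv track=rewrite | github.com/AWGL/variant_classification_DB | acmg_db/utils/acmg_classifier.py | get_benign_classification
-- ===== SOURCE A (Python) =====
-- def get_benign_classification(user_classifications):
--
-- 	"""
-- 	This function calculates the benign classifcation given the user input
--
-- 	Output is a string containing the classification.
--
-- 	"""
--
-- 	middle_classifications = {'BA' :0, 'BS':0, 'BP':0}
--
-- 	#go through each of the classifcations that the user has provided and update the middle_classifcations dictionary
--
-- 	for classification in user_classifications:
--
-- 		if classification[:2] in middle_classifications:
--
-- 			middle_classifications[classification[:2]] +=1
--
-- 	BA_count = middle_classifications['BA']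
-- 	BS_count = middle_classifications['BS']
-- 	BP_count = middle_classifications['BP']
--
--
-- 	if BA_count ==1:
--
-- 		return "Benign (I)"
--
-- 	elif BS_count >=2:
--
-- 		return "Benign (II)"
--
-- 	elif BS_count ==1 and BP_count ==1:
--
-- 		return "Likely Benign (I)"
--
-- 	elif BP_count >=2:
--
-- 		return "Likely Benign (II)"
--
-- 	else:
--
-- 		return "VUS"
-- ===== SOURCE B (Python) =====
-- def get_benign_classification(user_classifications):
-- 	"""
-- 	This function calculates the benign classifcation given the user input
--
-- 	Output is a string containing the classification.
-- 	"""
--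
-- 	# Three independent scalar scans, no counting dictionary.
-- 	BA_count = sum(1 for c in user_classifications if c[:2] == 'BA')
-- 	BS_count = sum(1 for c in user_classifications if c[:2] == 'BS')
-- 	BP_count = sum(1 for c in user_classifications if c[:2] == 'BP')
--
-- 	if BA_count == 1:
-- 		return "Benign (I)"
-- 	elif BS_count >= 2:
-- 		return "Benign (II)"
-- 	elif BS_count == 1 and BP_count == 1:
-- 		return "Likely Benign (I)"
-- 	elif BP_count >= 2:
-- 		return "Likely Benign (II)"
-- 	else:
-- 		return "VUS"
-- ===== Notes on version B (the rewrite author's own statement) =====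
-- stated objective: simpler
-- what changed: Replaced the counting dictionary and its membership-guarded update loop with three independent generator-expression counts over the list, keeping the identical classification cascade.
import Mathlib
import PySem

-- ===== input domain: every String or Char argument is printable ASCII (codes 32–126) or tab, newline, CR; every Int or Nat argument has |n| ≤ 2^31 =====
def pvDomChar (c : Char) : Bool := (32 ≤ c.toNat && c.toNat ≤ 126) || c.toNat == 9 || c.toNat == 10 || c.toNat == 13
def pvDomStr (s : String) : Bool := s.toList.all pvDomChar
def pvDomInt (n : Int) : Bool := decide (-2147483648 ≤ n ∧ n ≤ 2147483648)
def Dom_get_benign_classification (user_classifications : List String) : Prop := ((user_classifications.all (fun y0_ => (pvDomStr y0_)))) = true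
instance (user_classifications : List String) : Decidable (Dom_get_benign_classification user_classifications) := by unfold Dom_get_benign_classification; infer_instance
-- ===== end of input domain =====

-- B replaces A's counting dictionary with three independent count passes; same cascade (objective: simpler).

-- ===== PORT A =====
-- classification[:2] (a slice; never raises)
def pvPref2 (c : String) : String := PySem.Str.slice c none (some 2)

def get_benign_classification (user_classifications : List String) : String :=
  let middle_classifications : PySem.Dict String Int :=
    PySem.Dict.ofList [("BA", 0), ("BS", 0), ("BP", 0)]
  let d := user_classifications.foldl
    (fun d classification =>
      if d.contains (pvPref2 classification) then
        d.modify (pvPref2 classification) 0 (· + 1)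
      else d)
    middle_classifications
  let BA_count := d.getD "BA" 0
  let BS_count := d.getD "BS" 0
  let BP_count := d.getD "BP" 0
  if BA_count == 1 then "Benign (I)"
  else if BS_count ≥ 2 then "Benign (II)"
  else if BS_count == 1 && BP_count == 1 then "Likely Benign (I)"
  else if BP_count ≥ 2 then "Likely Benign (II)"
  else "VUS"

-- ===== PORT B =====
def get_benign_classification_alt (user_classifications : List String) : String :=
  let BA_count : Int := user_classifications.countP (fun c => pvPref2 c == "BA")
  let BS_count : Int := user_classifications.countP (fun c => pvPref2 c == "BS")
  let BP_count : Int := user_classifications.countP (fun c => pvPref2 c == "BP")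
  if BA_count == 1 then "Benign (I)"
  else if BS_count ≥ 2 then "Benign (II)"
  else if BS_count == 1 && BP_count == 1 then "Likely Benign (I)"
  else if BP_count ≥ 2 then "Likely Benign (II)"
  else "VUS"

-- ===== PRECONDITION & SPEC =====
def Spec_get_benign_classification (user_classifications : List String) (out : String) : Prop := out = get_benign_classification_alt user_classifications
instance (user_classifications : List String) (out : String) : Decidable (Spec_get_benign_classification user_classifications out) := by unfold Spec_get_benign_classification; infer_instance

-- ===== CLAIM (what is proved, stated in full; the proofs are below) =====
def Claim_equal_get_benign_classification : Prop := ∀ (user_classifications : List String), Dom_get_benign_classification user_classifications → Spec_get_benign_classification user_classifications (get_benign_classification user_classifications)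

-- ===== LEMMAS AND PROOFS =====

-- The loop invariant: for a dict whose keys are exactly the three codes, the loop adds
-- (count of elements with that prefix) to each of the three entries.
theorem pv_loop_getD (ucs : List String) :
    ∀ (d : PySem.Dict String Int), d.keys = ["BA", "BS", "BP"] →
      (∀ k : String, k ∈ (["BA", "BS", "BP"] : List String) →
        (ucs.foldl
          (fun d classification =>
            if d.contains (pvPref2 classification) then
              d.modify (pvPref2 classification) 0 (· + 1)
            else d) d).getD k 0
        = d.getD k 0 + (ucs.countP (fun c => pvPref2 c == k) : Int)) := by
  induction ucs with
  | nil => intro d _ k _; simp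
  | cons c rest ih =>
    intro d hkeys k hk
    have hcont : ∀ x : String, d.contains x = decide (x ∈ (["BA","BS","BP"] : List String)) := by
      intro x
      rw [PySem.Dict.contains_eq_decide_mem_keys, hkeys]
    by_cases hmem : pvPref2 c ∈ (["BA","BS","BP"] : List String)
    · -- prefix is one of the three: modify branch
      have hc : d.contains (pvPref2 c) = true := by rw [hcont]; exact decide_eq_true hmem
      have hkeys' : (d.modify (pvPref2 c) 0 (· + 1)).keys = ["BA", "BS", "BP"] := by
        rw [PySem.Dict.keys_modify, PySem.Dict.keys_insert_of_contains _ _ hc, hkeys]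
      rw [List.foldl_cons, if_pos hc, ih _ hkeys' k hk, List.countP_cons]
      by_cases hck : pvPref2 c = k
      · subst hck
        rw [PySem.Dict.getD_modify_self]
        simp only [beq_self_eq_true, if_pos]
        push_cast
        ring
      · rw [PySem.Dict.getD_modify_of_ne _ _ _ (fun h => hck h.symm)]
        simp [beq_iff_eq, hck]
    · -- prefix not a key: skip
      have hc : d.contains (pvPref2 c) = false := by rw [hcont]; exact decide_eq_false hmem
      rw [List.foldl_cons, if_neg (by simp [hc]), ih _ hkeys k hk, List.countP_cons]
      have hne : (pvPref2 c == k) = false := by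
        refine beq_eq_false_iff_ne.mpr fun h => hmem ?_
        rw [h]; exact hk
      simp [hne]

-- ===== VERDICT (by name: the statement is the Claim_ definition above) =====
theorem get_benign_classification_spec : Claim_equal_get_benign_classification := by
  intro ucs _
  unfold Spec_get_benign_classification get_benign_classification get_benign_classification_alt
  dsimp only
  have h := pv_loop_getD ucs (PySem.Dict.ofList [("BA", 0), ("BS", 0), ("BP", 0)]) (by decide)
  have hBA := h "BA" (by decide)
  have hBS := h "BS" (by decide)
  have hBP := h "BP" (by decide)
  have e1 : (PySem.Dict.ofList [("BA", (0:Int)), ("BS", 0), ("BP", 0)]).getD "BA" 0 = 0 := by decide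
  have e2 : (PySem.Dict.ofList [("BA", (0:Int)), ("BS", 0), ("BP", 0)]).getD "BS" 0 = 0 := by decide
  have e3 : (PySem.Dict.ofList [("BA", (0:Int)), ("BS", 0), ("BP", 0)]).getD "BP" 0 = 0 := by decide
  rw [e1] at hBA; rw [e2] at hBS; rw [e3] at hBP
  rw [hBA, hBS, hBP]
  norm_num
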